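-- pv_equiv track=rewrite | github.com/Artemigos/advent-of-code | python/2018/20/solution.py | find_deep
-- ===== SOURCE A (Python) =====
-- import queue
--
-- def find_deep(neighbors, min_depth):
--     q = queue.deque([(0, (0, 0))])
--     seen = set()
--     found = 0
--
--     while len(q) > 0:
--         depth, at = q.popleft()
--         if at in seen:
--             continue
--         seen.add(at)
--         if depth >= min_depth:
--             found += 1
--         if at in neighbors:
--             for n in neighbors[at]:
--                 q.append((depth+1, n))
--
--     return found
-- ===== SOURCE B (Python) =====
-- def find_deep(neighbors, min_depth):
--     frontier = [(0, 0)]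
--     seen = set()
--     depth = 0
--     found = 0
--     while frontier:
--         newly = []
--         for n in frontier:
--             if n not in seen:
--                 seen.add(n)
--                 newly.append(n)
--         if depth >= min_depth:
--             found += len(newly)
--         frontier = [m for v in newly for m in neighbors.get(v, [])]
--         depth += 1
--     return found
-- ===== Notes on version B (the rewrite author's own statement) =====
-- stated objective: alternative
-- what changed: Replaces the deque of (depth,node) pairs with a level-synchronous BFS: a plain frontier list per level plus one depth counter, counting a whole level in bulk instead of per pop.
import Mathlib
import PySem

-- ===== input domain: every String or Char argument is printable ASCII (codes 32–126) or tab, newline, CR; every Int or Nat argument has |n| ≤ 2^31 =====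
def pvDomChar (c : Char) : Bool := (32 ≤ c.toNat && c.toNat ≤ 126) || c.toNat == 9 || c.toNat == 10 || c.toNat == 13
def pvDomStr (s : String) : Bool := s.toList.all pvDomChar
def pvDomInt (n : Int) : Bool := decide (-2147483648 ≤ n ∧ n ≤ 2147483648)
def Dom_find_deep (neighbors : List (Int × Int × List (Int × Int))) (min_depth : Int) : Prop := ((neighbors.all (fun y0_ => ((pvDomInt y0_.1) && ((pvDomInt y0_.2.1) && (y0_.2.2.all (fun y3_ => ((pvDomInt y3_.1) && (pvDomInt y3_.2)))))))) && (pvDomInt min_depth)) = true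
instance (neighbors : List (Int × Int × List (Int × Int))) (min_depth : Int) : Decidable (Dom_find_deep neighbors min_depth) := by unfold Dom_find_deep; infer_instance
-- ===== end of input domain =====

-- B replaces A's deque of (depth, node) pairs by a level-synchronous BFS (frontier list + one
-- depth counter, counting a whole level in bulk); objective: alternative decomposition, not speed.

-- dict lookup (first matching key (k1,k2)); shared dict primitive of both ports
def nbGet? (nbs : List (Int × Int × List (Int × Int))) (v : Int × Int) :
    Option (List (Int × Int)) :=
  match nbs with
  | [] => none
  | (a, b, ns) :: rest => if a = v.1 ∧ b = v.2 then some ns else nbGet? rest v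

-- every node that can ever be enqueued: the start node and all neighbor-list entries
def pvUniverse (nbs : List (Int × Int × List (Int × Int))) : List (Int × Int) :=
  ((0 : Int), (0 : Int)) :: nbs.flatMap (fun e => e.2.2)

-- number of universe nodes not yet seen (termination measure of both loops)
def unseenCount (U : List (Int × Int)) (seen : List (Int × Int)) : Nat :=
  (U.filter (fun x => decide (x ∉ seen))).length

theorem unseenCount_sublist (U : List (Int × Int)) (s t : List (Int × Int))
    (h : ∀ y, y ∈ s → y ∈ t) :
    List.Sublist (U.filter (fun x => decide (x ∉ t))) (U.filter (fun x => decide (x ∉ s))) :=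
  List.monotone_filter_right U (by
    intro a ha
    simp only [decide_eq_true_eq] at ha ⊢
    exact fun has => ha (h a has))

theorem unseenCount_le (U : List (Int × Int)) (s t : List (Int × Int))
    (h : ∀ y, y ∈ s → y ∈ t) : unseenCount U t ≤ unseenCount U s :=
  (unseenCount_sublist U s t h).length_le

theorem unseenCount_lt (U : List (Int × Int)) (s t : List (Int × Int))
    (h : ∀ y, y ∈ s → y ∈ t) (x : Int × Int) (hxU : x ∈ U) (hxs : x ∉ s) (hxt : x ∈ t) :
    unseenCount U t < unseenCount U s := by
  unfold unseenCount
  by_contra hlt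
  rw [Nat.not_lt] at hlt
  have heq := (unseenCount_sublist U s t h).eq_of_length_le hlt
  have hx1 : x ∈ U.filter (fun x => decide (x ∉ s)) := by
    simp only [List.mem_filter, decide_eq_true_eq]; exact ⟨hxU, hxs⟩
  rw [← heq] at hx1
  simp only [List.mem_filter, decide_eq_true_eq] at hx1
  exact hx1.2 hxt

theorem nbGet?_mem_universe (nbs : List (Int × Int × List (Int × Int)))
    (v : Int × Int) (ns : List (Int × Int)) (h : nbGet? nbs v = some ns) :
    ∀ n ∈ ns, n ∈ pvUniverse nbs := by
  intro n hn
  simp only [pvUniverse, List.mem_cons, List.mem_flatMap]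
  right
  induction nbs with
  | nil => simp [nbGet?] at h
  | cons e rest ih =>
    match e with
    | (a, b, vs) =>
      simp only [nbGet?] at h
      by_cases hc : a = v.1 ∧ b = v.2
      · rw [if_pos hc] at h
        have hnv : n ∈ vs := by injection h with h2; rw [h2]; exact hn
        exact ⟨(a, b, vs), by simp, hnv⟩
      · rw [if_neg hc] at h
        obtain ⟨e', he', hn'⟩ := ih h
        exact ⟨e', by simp [he'], hn'⟩

-- ===== PORT A ===== (literal port of A's queue loop; the hq proof argument only
-- justifies termination — it does not alter the computation)
def findDeepAux (nbs : List (Int × Int × List (Int × Int))) (min_depth : Int)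
    (q : List (Int × (Int × Int))) (seen : PySem.Set (Int × Int))
    (found : Int) (hq : ∀ p ∈ q, p.2 ∈ pvUniverse nbs) : Int :=
  match q with
  | [] => found
  | (depth, v) :: rest =>
    if hv : v ∈ seen then
      findDeepAux nbs min_depth rest seen found
        (fun p hp => hq p (List.mem_cons_of_mem _ hp))
    else
      let seen' := PySem.Set.add seen v
      let found' := if depth ≥ min_depth then found + 1 else found
      let q' := match nbGet? nbs v with
        | some ns => rest ++ ns.map (fun n => (depth + 1, n))
        | none => rest
      findDeepAux nbs min_depth q' seen' found'
        (by
          intro p hp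
          simp only [q'] at hp
          rcases hg : nbGet? nbs v with _ | ns <;> rw [hg] at hp
          · exact hq p (List.mem_cons_of_mem _ hp)
          · rcases List.mem_append.mp hp with hmem | hmem
            · exact hq p (List.mem_cons_of_mem _ hmem)
            · obtain ⟨n, hn, rfl⟩ := List.mem_map.mp hmem
              exact nbGet?_mem_universe nbs v ns hg n hn)
termination_by (unseenCount (pvUniverse nbs) seen, q.length)
decreasing_by
  · apply Prod.Lex.right; simp
  · apply Prod.Lex.left
    exact unseenCount_lt (pvUniverse nbs) seen (PySem.Set.add seen v)
      (by intro y hy; simp [PySem.Set.mem_add, hy])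
      v (hq (depth, v) (by simp)) hv (by simp [PySem.Set.mem_add])

def find_deep (neighbors : List (Int × Int × List (Int × Int))) (min_depth : Int) : Int :=
  findDeepAux neighbors min_depth [(0, ((0 : Int), (0 : Int)))] [] 0
    (by intro p hp; rcases List.mem_singleton.mp hp with rfl; simp [pvUniverse])

-- newOf seen frontier: the frontier nodes not yet seen, in order, first occurrences only
-- (the functional reading of B's inner loop; used by the proofs and by B's termination)
def newOf (seen : PySem.Set (Int × Int)) : List (Int × Int) → List (Int × Int)
  | [] => []
  | n :: t => if n ∈ seen then newOf seen t else n :: newOf (PySem.Set.add seen n) t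

-- B's inner loop "for n in frontier: if n not in seen: seen.add(n); newly.append(n)"
def dedupLoop (acc : List (Int × Int) × PySem.Set (Int × Int))
    (frontier : List (Int × Int)) : List (Int × Int) × PySem.Set (Int × Int) :=
  frontier.foldl (fun a n => if n ∈ a.2 then a else (a.1 ++ [n], PySem.Set.add a.2 n)) acc

theorem dedup_foldl (cur : List (Int × Int)) :
    ∀ (ny seen : List (Int × Int)),
      dedupLoop (ny, seen) cur = (ny ++ newOf seen cur, PySem.Set.update seen cur) := by
  induction cur with
  | nil => intro ny seen; simp [dedupLoop, newOf, PySem.Set.update_nil]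
  | cons n t ih =>
    intro ny seen
    by_cases hn : n ∈ seen
    · simp only [dedupLoop, List.foldl_cons, if_pos hn, newOf] at *
      simp [ih, PySem.Set.update_cons, PySem.Set.add_of_mem hn]
    · simp only [dedupLoop, List.foldl_cons, if_neg hn, newOf] at *
      simp [ih, PySem.Set.update_cons, List.append_assoc]

theorem newOf_mem (seen : PySem.Set (Int × Int)) (cur : List (Int × Int)) :
    ∀ n ∈ newOf seen cur, n ∈ cur ∧ n ∉ seen ∧ n ∈ PySem.Set.update seen cur := by
  induction cur generalizing seen with
  | nil => simp [newOf]
  | cons m t ih =>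
    intro n hn
    by_cases hm : m ∈ seen
    · simp only [newOf, if_pos hm] at hn
      obtain ⟨h1, h2, h3⟩ := ih seen n hn
      exact ⟨List.mem_cons_of_mem _ h1, h2, by
        simpa [PySem.Set.update_cons, PySem.Set.add_of_mem hm] using h3⟩
    · simp only [newOf, if_neg hm, List.mem_cons] at hn
      rcases hn with rfl | hn
      · refine ⟨List.mem_cons_self, hm, ?_⟩
        simp [PySem.Set.update_cons, PySem.Set.mem_update, PySem.Set.mem_add]
      · obtain ⟨h1, h2, h3⟩ := ih (PySem.Set.add seen m) n hn
        refine ⟨List.mem_cons_of_mem _ h1, fun hc => h2 ?_,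
          by simpa [PySem.Set.update_cons] using h3⟩
        simp [PySem.Set.mem_add, hc]

theorem mem_update_of_mem (seen : PySem.Set (Int × Int)) (cur : List (Int × Int))
    (y : Int × Int) (hy : y ∈ seen) : y ∈ PySem.Set.update seen cur := by
  simp [PySem.Set.mem_update, hy]

-- ===== PORT B ===== (literal port of B's level-synchronous loop; the hf proof argument only
-- justifies termination — it does not alter the computation)
def findDeepAltAux (nbs : List (Int × Int × List (Int × Int))) (min_depth : Int)
    (frontier : List (Int × Int)) (seen : PySem.Set (Int × Int))
    (depth : Int) (found : Int) (hf : ∀ n ∈ frontier, n ∈ pvUniverse nbs) : Int :=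
  match frontier with
  | [] => found
  | hd :: tl =>
    let p := dedupLoop ([], seen) (hd :: tl)
    let newly := p.1
    let seen' := p.2
    let found' := if depth ≥ min_depth then found + (newly.length : Int) else found
    let next := newly.flatMap (fun n => (nbGet? nbs n).getD [])
    findDeepAltAux nbs min_depth next seen' (depth + 1) found'
      (by
        intro n hn
        obtain ⟨m, hm, hn'⟩ := List.mem_flatMap.mp hn
        cases hg : nbGet? nbs m with
        | none => simp [hg] at hn'
        | some ns => exact nbGet?_mem_universe nbs m ns hg n (by simpa [hg] using hn'))
termination_by (unseenCount (pvUniverse nbs) seen, frontier.length)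
decreasing_by
  simp only [dedup_foldl, List.nil_append]
  match hnew : newOf seen (hd :: tl) with
  | [] =>
    apply Prod.Lex.right'
    · exact unseenCount_le _ _ _ (mem_update_of_mem seen (hd :: tl))
    · simp
  | n0 :: _ =>
    apply Prod.Lex.left
    obtain ⟨h1, h2, h3⟩ := newOf_mem seen (hd :: tl) n0 (hnew ▸ List.mem_cons_self)
    exact unseenCount_lt (pvUniverse nbs) seen (PySem.Set.update seen (hd :: tl))
      (mem_update_of_mem seen (hd :: tl)) n0 (hf n0 h1) h2 h3

def find_deep_alt (neighbors : List (Int × Int × List (Int × Int))) (min_depth : Int) : Int :=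
  findDeepAltAux neighbors min_depth [((0 : Int), (0 : Int))] [] 0 0
    (by intro n hn; rcases List.mem_singleton.mp hn with rfl; simp [pvUniverse])

-- ===== PRECONDITION & SPEC =====
def Spec_find_deep (neighbors : List (Int × Int × List (Int × Int))) (min_depth : Int) (out : Int) : Prop := out = find_deep_alt neighbors min_depth
instance (neighbors : List (Int × Int × List (Int × Int))) (min_depth : Int) (out : Int) : Decidable (Spec_find_deep neighbors min_depth out) := by unfold Spec_find_deep; infer_instance

-- ===== CLAIM (what is proved, stated in full; the proofs are below) =====
def Claim_equal_find_deep : Prop := ∀ (neighbors : List (Int × Int × List (Int × Int))) (min_depth : Int), Dom_find_deep neighbors min_depth → Spec_find_deep neighbors min_depth (find_deep neighbors min_depth)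

-- ===== LEMMAS AND PROOFS =====

theorem nbrD_mem_universe (nbs : List (Int × Int × List (Int × Int))) (v : Int × Int) :
    ∀ n ∈ (nbGet? nbs v).getD [], n ∈ pvUniverse nbs := by
  intro n hn
  cases hg : nbGet? nbs v with
  | none => simp [hg] at hn
  | some ns => exact nbGet?_mem_universe nbs v ns hg n (by simpa [hg] using hn)

theorem findDeepAux_congr (nbs : List (Int × Int × List (Int × Int))) (md : Int)
    {q q' : List (Int × (Int × Int))} {seen seen' : PySem.Set (Int × Int)} {found found' : Int}
    (h1 : q = q') (h2 : seen = seen') (h3 : found = found')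
    (hq : ∀ p ∈ q, p.2 ∈ pvUniverse nbs) (hq' : ∀ p ∈ q', p.2 ∈ pvUniverse nbs) :
    findDeepAux nbs md q seen found hq = findDeepAux nbs md q' seen' found' hq' := by
  subst h1; subst h2; subst h3; rfl

theorem auxA_nil (nbs : List (Int × Int × List (Int × Int))) (md : Int)
    (seen : PySem.Set (Int × Int)) (found : Int)
    (hq : ∀ p ∈ ([] : List (Int × (Int × Int))), p.2 ∈ pvUniverse nbs) :
    findDeepAux nbs md [] seen found hq = found := by
  rw [findDeepAux]

theorem auxA_cons (nbs : List (Int × Int × List (Int × Int))) (md depth : Int)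
    (v : Int × Int) (rest : List (Int × (Int × Int))) (seen : PySem.Set (Int × Int)) (found : Int)
    (hq : ∀ p ∈ (depth, v) :: rest, p.2 ∈ pvUniverse nbs)
    (hq1 : ∀ p ∈ rest, p.2 ∈ pvUniverse nbs)
    (hq2 : ∀ p ∈ rest ++ ((nbGet? nbs v).getD []).map (fun n => (depth + 1, n)), p.2 ∈ pvUniverse nbs) :
    findDeepAux nbs md ((depth, v) :: rest) seen found hq =
      if v ∈ seen then
        findDeepAux nbs md rest seen found hq1
      else
        findDeepAux nbs md (rest ++ ((nbGet? nbs v).getD []).map (fun n => (depth + 1, n)))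
          (PySem.Set.add seen v) (if depth ≥ md then found + 1 else found) hq2 := by
  rw [findDeepAux]
  by_cases hv : v ∈ seen
  · rw [dif_pos hv, if_pos hv]
  · rw [dif_neg hv, if_neg hv]
    exact findDeepAux_congr nbs md (by cases nbGet? nbs v <;> simp) rfl rfl _ hq2

theorem altAux_nil (nbs : List (Int × Int × List (Int × Int))) (md : Int)
    (seen : PySem.Set (Int × Int)) (d found : Int)
    (hf : ∀ n ∈ ([] : List (Int × Int)), n ∈ pvUniverse nbs) :
    findDeepAltAux nbs md [] seen d found hf = found := by
  rw [findDeepAltAux]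

theorem findDeepAltAux_congr (nbs : List (Int × Int × List (Int × Int))) (md : Int)
    {fr fr' : List (Int × Int)} {seen seen' : PySem.Set (Int × Int)} {d d' found found' : Int}
    (h1 : fr = fr') (h2 : seen = seen') (h3 : d = d') (h4 : found = found')
    (hf : ∀ n ∈ fr, n ∈ pvUniverse nbs) (hf' : ∀ n ∈ fr', n ∈ pvUniverse nbs) :
    findDeepAltAux nbs md fr seen d found hf = findDeepAltAux nbs md fr' seen' d' found' hf' := by
  subst h1; subst h2; subst h3; subst h4; rfl

theorem altAux_cons (nbs : List (Int × Int × List (Int × Int))) (md : Int)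
    (hd : Int × Int) (tl : List (Int × Int)) (seen : PySem.Set (Int × Int)) (d found : Int)
    (hf : ∀ n ∈ hd :: tl, n ∈ pvUniverse nbs)
    (hf2 : ∀ n ∈ (newOf seen (hd :: tl)).flatMap (fun n => (nbGet? nbs n).getD []), n ∈ pvUniverse nbs) :
    findDeepAltAux nbs md (hd :: tl) seen d found hf =
      findDeepAltAux nbs md
        ((newOf seen (hd :: tl)).flatMap (fun n => (nbGet? nbs n).getD []))
        (PySem.Set.update seen (hd :: tl)) (d + 1)
        (if d ≥ md then found + ((newOf seen (hd :: tl)).length : Int) else found) hf2 := by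
  rw [findDeepAltAux]
  simp only [dedup_foldl, List.nil_append]

-- one whole BFS level of A equals the bulk level step of B
theorem levelStep (nbs : List (Int × Int × List (Int × Int))) (md d : Int) :
    ∀ (cur : List (Int × Int)), ∀ (nxt : List (Int × Int)) (seen : PySem.Set (Int × Int)) (found : Int)
      (hq : ∀ p ∈ cur.map (fun n => (d, n)) ++ nxt.map (fun n => (d + 1, n)), p.2 ∈ pvUniverse nbs)
      (hq' : ∀ p ∈ (nxt ++ (newOf seen cur).flatMap (fun n => (nbGet? nbs n).getD [])).map (fun n => (d + 1, n)), p.2 ∈ pvUniverse nbs),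
      findDeepAux nbs md (cur.map (fun n => (d, n)) ++ nxt.map (fun n => (d + 1, n))) seen found hq
        = findDeepAux nbs md
            ((nxt ++ (newOf seen cur).flatMap (fun n => (nbGet? nbs n).getD [])).map (fun n => (d + 1, n)))
            (PySem.Set.update seen cur)
            (found + (if d ≥ md then ((newOf seen cur).length : Int) else 0)) hq' := by
  intro cur
  induction cur with
  | nil =>
    intro nxt seen found hq hq'
    exact findDeepAux_congr nbs md (by simp [newOf]) (by simp [PySem.Set.update_nil])
      (by simp [newOf]) _ _
  | cons v cur ih =>
    intro nxt seen found hq hq'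
    have hqtail : ∀ p ∈ cur.map (fun n => (d, n)) ++ nxt.map (fun n => (d + 1, n)), p.2 ∈ pvUniverse nbs := by
      intro p hp
      apply hq
      simp only [List.map_cons, List.cons_append]
      exact List.mem_cons_of_mem _ hp
    have hqcons : ∀ p ∈ (d, v) :: (cur.map (fun n => (d, n)) ++ nxt.map (fun n => (d + 1, n))), p.2 ∈ pvUniverse nbs := by
      simpa using hq
    have hqget2 : ∀ p ∈ (cur.map (fun n => (d, n)) ++ nxt.map (fun n => (d + 1, n))) ++ ((nbGet? nbs v).getD []).map (fun n => (d + 1, n)), p.2 ∈ pvUniverse nbs := by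
      intro p hp
      rcases List.mem_append.mp hp with h | h
      · exact hqtail p h
      · obtain ⟨n, hn, rfl⟩ := List.mem_map.mp h
        exact nbrD_mem_universe nbs v n hn
    have hqget : ∀ p ∈ cur.map (fun n => (d, n)) ++ (nxt ++ (nbGet? nbs v).getD []).map (fun n => (d + 1, n)), p.2 ∈ pvUniverse nbs := by
      intro p hp
      rcases List.mem_append.mp hp with h | h
      · exact hqtail p (List.mem_append_left _ h)
      · obtain ⟨n, hn, rfl⟩ := List.mem_map.mp h
        rcases List.mem_append.mp hn with h' | h'
        · exact hqtail (d + 1, n) (List.mem_append_right _ (List.mem_map_of_mem h'))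
        · exact nbrD_mem_universe nbs v n h'
    refine Eq.trans (auxA_cons nbs md d v (cur.map (fun n => (d, n)) ++ nxt.map (fun n => (d + 1, n))) seen found hqcons hqtail hqget2) ?_
    by_cases hv : v ∈ seen
    · rw [if_pos hv]
      refine Eq.trans (ih nxt seen found hqtail (by
        intro p hp
        apply hq'
        simpa [newOf, if_pos hv] using hp)) ?_
      exact findDeepAux_congr nbs md (by simp [newOf, if_pos hv])
        (by simp [PySem.Set.update_cons, PySem.Set.add_of_mem hv]) (by simp [newOf, if_pos hv]) _ _
    · rw [if_neg hv]
      refine Eq.trans (findDeepAux_congr nbs md (by simp [List.map_append]) rfl rfl hqget2 hqget) ?_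
      refine Eq.trans (ih (nxt ++ (nbGet? nbs v).getD []) (PySem.Set.add seen v)
        (if d ≥ md then found + 1 else found) hqget (by
          intro p hp
          apply hq'
          obtain ⟨n, hn, rfl⟩ := List.mem_map.mp hp
          apply List.mem_map_of_mem
          rcases List.mem_append.mp hn with h | h
          · rcases List.mem_append.mp h with h' | h'
            · exact List.mem_append_left _ h'
            · refine List.mem_append_right _ ?_
              refine List.mem_flatMap.mpr ⟨v, ?_, h'⟩
              simp [newOf, if_neg hv]
          · refine List.mem_append_right _ ?_
            obtain ⟨m, hm, hn'⟩ := List.mem_flatMap.mp h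
            refine List.mem_flatMap.mpr ⟨m, ?_, hn'⟩
            simp only [newOf, if_neg hv]
            exact List.mem_cons_of_mem _ hm)) ?_
      refine findDeepAux_congr nbs md ?_ ?_ ?_ _ _
      · simp only [newOf, if_neg hv, List.flatMap_cons, List.append_assoc]
      · simp [PySem.Set.update_cons]
      · simp only [newOf, if_neg hv, List.length_cons]
        split <;> push_cast <;> ring

-- the two loops compute the same total, level by level
theorem bridge (nbs : List (Int × Int × List (Int × Int))) (md : Int) :
    ∀ (k : Nat) (frontier : List (Int × Int)) (seen : PySem.Set (Int × Int)) (d found : Int)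
      (hq : ∀ p ∈ frontier.map (fun n => (d, n)), p.2 ∈ pvUniverse nbs)
      (hf : ∀ n ∈ frontier, n ∈ pvUniverse nbs),
      unseenCount (pvUniverse nbs) seen = k →
      findDeepAux nbs md (frontier.map (fun n => (d, n))) seen found hq
        = findDeepAltAux nbs md frontier seen d found hf := by
  intro k
  induction k using Nat.strong_induction_on with
  | _ k ih =>
    intro frontier seen d found hq hf hk
    match frontier with
    | [] =>
      exact Eq.trans (findDeepAux_congr nbs md (q' := []) (by simp) rfl rfl hq (by simp))
        (Eq.trans (auxA_nil nbs md seen found (by simp)) (altAux_nil nbs md seen d found hf).symm)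
    | hd :: tl =>
      have hf2 : ∀ n ∈ (newOf seen (hd :: tl)).flatMap (fun n => (nbGet? nbs n).getD []), n ∈ pvUniverse nbs := by
        intro m hm
        obtain ⟨n, hn, hn'⟩ := List.mem_flatMap.mp hm
        exact nbrD_mem_universe nbs n m hn'
      have hq0 : ∀ p ∈ (hd :: tl).map (fun n => (d, n)) ++ ([] : List (Int × Int)).map (fun n => (d + 1, n)), p.2 ∈ pvUniverse nbs := by
        simpa using hq
      have hq1 : ∀ p ∈ (([] : List (Int × Int)) ++ (newOf seen (hd :: tl)).flatMap (fun n => (nbGet? nbs n).getD [])).map (fun n => (d + 1, n)), p.2 ∈ pvUniverse nbs := by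
        intro p hp
        obtain ⟨n, hn, rfl⟩ := List.mem_map.mp hp
        exact hf2 n (by simpa using hn)
      have hq2 : ∀ p ∈ ((newOf seen (hd :: tl)).flatMap (fun n => (nbGet? nbs n).getD [])).map (fun n => (d + 1, n)), p.2 ∈ pvUniverse nbs := by
        intro p hp
        obtain ⟨n, hn, rfl⟩ := List.mem_map.mp hp
        exact hf2 n hn
      rw [altAux_cons nbs md hd tl seen d found hf hf2]
      refine Eq.trans (findDeepAux_congr nbs md (by simp) rfl rfl hq hq0) ?_
      refine Eq.trans (levelStep nbs md d (hd :: tl) [] seen found hq0 hq1) ?_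
      refine Eq.trans (findDeepAux_congr nbs md
        (q' := ((newOf seen (hd :: tl)).flatMap (fun n => (nbGet? nbs n).getD [])).map (fun n => (d + 1, n)))
        (found' := if d ≥ md then found + ((newOf seen (hd :: tl)).length : Int) else found)
        (by simp) rfl (by split <;> simp) hq1 hq2) ?_
      by_cases hnew : newOf seen (hd :: tl) = []
      · refine Eq.trans (findDeepAux_congr nbs md (q' := []) (by simp [hnew]) rfl rfl hq2 (by simp)) ?_
        refine Eq.trans (auxA_nil nbs md (PySem.Set.update seen (hd :: tl)) _ (by simp)) ?_
        refine Eq.symm ?_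
        exact Eq.trans (findDeepAltAux_congr nbs md (fr' := []) (by simp [hnew]) rfl rfl rfl hf2 (by simp))
          (altAux_nil nbs md (PySem.Set.update seen (hd :: tl)) (d + 1) _ (by simp))
      · obtain ⟨n0, hn0⟩ := List.exists_mem_of_ne_nil _ hnew
        refine ih (unseenCount (pvUniverse nbs) (PySem.Set.update seen (hd :: tl))) ?_
          ((newOf seen (hd :: tl)).flatMap (fun n => (nbGet? nbs n).getD []))
          (PySem.Set.update seen (hd :: tl)) (d + 1) _ hq2 hf2 rfl
        rw [← hk]
        obtain ⟨h1, h2, h3⟩ := newOf_mem seen (hd :: tl) n0 hn0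
        exact unseenCount_lt (pvUniverse nbs) seen (PySem.Set.update seen (hd :: tl))
          (mem_update_of_mem seen (hd :: tl)) n0 (hf n0 h1) h2 h3

-- ===== VERDICT (by name: the statement is the Claim_ definition above) =====
theorem find_deep_spec : Claim_equal_find_deep := by
  intro neighbors min_depth _
  unfold Spec_find_deep find_deep find_deep_alt
  exact bridge neighbors min_depth (unseenCount (pvUniverse neighbors) [])
    [((0 : Int), (0 : Int))] [] 0 0
    (by intro p hp; rcases List.mem_singleton.mp hp with rfl; simp [pvUniverse])
    (by intro n hn; rcases List.mem_singleton.mp hn with rfl; simp [pvUniverse]) rfl
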